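-- pv_equiv track=rewrite | github.com/Whizma/aoc24 | 2/d2.py | problem_dampener
-- ===== SOURCE A (Python) =====
-- def is_valid_sequence(level):
--   increasing = level[0] < level[1]
--   for a, b in zip(level, level[1:]):
--     if a == b:
--       return False
--
--     if increasing and (b - a < 1 or b - a > 3 or b <= a):
--       return False
--
--     if not increasing and (a - b < 1 or a - b > 3 or b >= a):
--       return False
--
--   return True
--
-- def problem_dampener(level):
--   if is_valid_sequence(level):
--     return True
--
--   for i in range(len(level)):
--     test_level = level[:i] + level[i+1:]
--     if is_valid_sequence(test_level):
--       return True
--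
--   return False
-- ===== SOURCE B (Python) =====
-- def _first_bad(level, lo, hi):
--     # index of the first adjacent pair whose difference is outside [lo, hi], else None
--     for i in range(len(level) - 1):
--         d = level[i + 1] - level[i]
--         if d < lo or d > hi:
--             return i
--     return None
--
-- def _ok_dir(level, lo, hi):
--     i = _first_bad(level, lo, hi)
--     if i is None:
--         return True
--     for j in (i, i + 1):
--         if _first_bad(level[:j] + level[j + 1:], lo, hi) is None:
--             return True
--     return False
--
-- def problem_dampener(level):
--     return _ok_dir(level, 1, 3) or _ok_dir(level, -3, -1)
-- ===== Notes on version B (the rewrite author's own statement) =====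
-- stated objective: faster
-- what changed: Instead of retrying validity after removing every index (O(n^2)), B scans once per direction, locates the first out-of-range adjacent difference, and only tries removing the two indices involved in that violation.
import Mathlib
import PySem

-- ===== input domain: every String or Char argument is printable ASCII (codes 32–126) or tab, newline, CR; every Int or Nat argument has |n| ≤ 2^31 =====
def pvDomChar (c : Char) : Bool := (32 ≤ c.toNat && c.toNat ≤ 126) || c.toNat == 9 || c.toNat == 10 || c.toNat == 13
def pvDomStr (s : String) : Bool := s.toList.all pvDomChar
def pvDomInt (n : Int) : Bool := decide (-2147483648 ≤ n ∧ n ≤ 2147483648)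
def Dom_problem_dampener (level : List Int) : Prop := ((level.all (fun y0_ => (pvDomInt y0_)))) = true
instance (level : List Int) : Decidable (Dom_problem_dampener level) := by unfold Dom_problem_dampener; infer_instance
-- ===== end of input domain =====

-- B replaces A's try-removing-every-index quadratic search by a single scan per direction
-- that only tries removing the two indices of the first out-of-range adjacent difference (faster, asymptotic).

-- ===== PORT A =====
-- the 'for a, b in zip(level, level[1:])' loop of is_valid_sequence
def ivsLoop (inc : Bool) : List (Int × Int) → Bool
  | [] => true
  | (a, b) :: rest =>
    if a == b then false
    else if inc && (b - a < 1 || b - a > 3 || b ≤ a) then false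
    else if (!inc) && (a - b < 1 || a - b > 3 || b ≥ a) then false
    else ivsLoop inc rest

def is_valid_sequence (level : List Int) : Bool :=
  match level with
  | a :: b :: _ => ivsLoop (decide (a < b)) (level.zip level.tail)
  | _ => false   -- Python raises IndexError here (len < 2); such inputs are outside Pre_

def problem_dampener (level : List Int) : Bool :=
  if is_valid_sequence level then true
  else
    -- for i in range(len(level)): test level[:i] + level[i+1:], early-return True = any
    (List.range level.length).any (fun i =>
      is_valid_sequence (level.take i ++ level.drop (i + 1)))

-- ===== PORT B =====
-- the index loop of _first_bad, carrying the current index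
def fbAux (lo hi : Int) : List Int → Nat → Option Nat
  | a :: b :: rest, i =>
    if b - a < lo || b - a > hi then some i else fbAux lo hi (b :: rest) (i + 1)
  | _, _ => none

-- level[:j] + level[j+1:]
def removeAt (level : List Int) (j : Nat) : List Int := level.take j ++ level.drop (j + 1)

def okDir (level : List Int) (lo hi : Int) : Bool :=
  match fbAux lo hi level 0 with
  | none => true
  | some i =>
    (fbAux lo hi (removeAt level i) 0).isNone || (fbAux lo hi (removeAt level (i + 1)) 0).isNone

def problem_dampener_alt (level : List Int) : Bool :=
  okDir level 1 3 || okDir level (-3) (-1)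

-- ===== PRECONDITION & SPEC =====
-- Pre_ excludes exactly the inputs where A raises IndexError: lists of length < 2,
-- and length-2 lists whose single difference does not lie between 1 and 3 in absolute value
-- (there the dampener loop tests a one-element list, and level[1] raises).
def Pre_problem_dampener (level : List Int) : Prop :=
  3 ≤ level.length ∨
    (level.length = 2 ∧
      ((1 ≤ level.getD 1 0 - level.getD 0 0 ∧ level.getD 1 0 - level.getD 0 0 ≤ 3) ∨
       (1 ≤ level.getD 0 0 - level.getD 1 0 ∧ level.getD 0 0 - level.getD 1 0 ≤ 3)))
instance (level : List Int) : Decidable (Pre_problem_dampener level) := by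
  unfold Pre_problem_dampener; infer_instance

def pvWitness_problem_dampener : List Int := [1, 2, 4, 5]

def Spec_problem_dampener (level : List Int) (out : Bool) : Prop := out = problem_dampener_alt level
instance (level : List Int) (out : Bool) : Decidable (Spec_problem_dampener level out) := by unfold Spec_problem_dampener; infer_instance

-- ===== CLAIM (what is proved, stated in full; the proofs are below) =====
def Claim_equal_problem_dampener : Prop := ∀ (level : List Int), Dom_problem_dampener level → Pre_problem_dampener level → Spec_problem_dampener level (problem_dampener level)
-- ===== LEMMAS AND PROOFS =====

-- the step relation of a direction: adjacent difference within [lo, hi]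
def Step (lo hi : Int) (a b : Int) : Prop := lo ≤ b - a ∧ b - a ≤ hi

theorem fb_none_iff (lo hi : Int) : ∀ (xs : List Int) (i : Nat),
    fbAux lo hi xs i = none ↔ List.IsChain (Step lo hi) xs
  | [], _ => by simp [fbAux]
  | [a], _ => by simp [fbAux]
  | a :: b :: rest, i => by
    rw [fbAux]
    split_ifs with h
    · simp only [false_iff, List.isChain_cons_cons]
      simp only [Bool.or_eq_true, decide_eq_true_iff] at h
      intro hc
      have h1 : lo ≤ b - a := hc.1.1
      have h2 : b - a ≤ hi := hc.1.2
      omega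
    · rw [fb_none_iff lo hi (b :: rest) (i + 1), List.isChain_cons_cons]
      simp only [Bool.or_eq_true, decide_eq_true_iff, not_or, not_lt] at h
      have hs : Step lo hi a b := ⟨h.1, h.2⟩
      exact ⟨fun hrest => ⟨hs, hrest⟩, fun hch => hch.2⟩

theorem fb_some_spec (lo hi : Int) : ∀ (xs : List Int) (i j : Nat),
    fbAux lo hi xs i = some j → ∃ k, j = i + k ∧ k + 1 < xs.length ∧
      ¬ Step lo hi (xs.getD k 0) (xs.getD (k + 1) 0)
  | [], _, _ => by simp [fbAux]
  | [a], _, _ => by simp [fbAux]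
  | a :: b :: rest, i, j => by
    rw [fbAux]
    split_ifs with h
    · intro hj
      refine ⟨0, by simpa using hj.symm, by simp, ?_⟩
      simp only [Bool.or_eq_true, decide_eq_true_iff] at h
      simp only [List.getD_cons_zero, List.getD_cons_succ, Step, not_and]
      omega
    · intro hj
      obtain ⟨k, hk, hlen, hstep⟩ := fb_some_spec lo hi (b :: rest) (i + 1) j hj
      refine ⟨k + 1, by omega, by simp at hlen ⊢; omega, ?_⟩
      simpa [List.getD_cons_succ] using hstep

theorem removeAt_length (xs : List Int) (j : Nat) (hj : j < xs.length) :
    (removeAt xs j).length = xs.length - 1 := by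
  simp [removeAt]
  omega

theorem removeAt_getElem? (xs : List Int) (j k : Nat) (hj : j ≤ xs.length) :
    (removeAt xs j)[k]? = if k < j then xs[k]? else xs[k + 1]? := by
  unfold removeAt
  split_ifs with hk
  · rw [List.getElem?_append_left (by simp; omega), List.getElem?_take_of_lt hk]
  · rw [List.getElem?_append_right (by simp; omega), List.getElem?_drop]
    congr 1
    simp
    omega

-- core: a valid one-removal must remove one of the two ends of the first violation
theorem remove_adj (lo hi : Int) (xs : List Int) (i j : Nat)
    (hfb : fbAux lo hi xs 0 = some i) (hj : j < xs.length)
    (hch : List.IsChain (Step lo hi) (removeAt xs j)) : j = i ∨ j = i + 1 := by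
  obtain ⟨k, hk0, hlen0, hstep0⟩ := fb_some_spec lo hi xs 0 i hfb
  have hki : k = i := by omega
  have hlen : i + 1 < xs.length := by omega
  have hstep : ¬ Step lo hi (xs.getD i 0) (xs.getD (i + 1) 0) := by rwa [hki] at hstep0
  by_contra hne
  push Not at hne
  obtain ⟨hne1, hne2⟩ := hne
  -- the violating pair (xs[i], xs[i+1]) is still adjacent in removeAt xs j
  have hrl : (removeAt xs j).length = xs.length - 1 := removeAt_length xs j hj
  rcases Nat.lt_or_ge j i with hlt | hge
  · -- j < i : the pair sits at index i - 1 of the removed list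
    have h1 : i - 1 + 1 < (removeAt xs j).length := by omega
    have := List.isChain_iff_getElem.mp hch (i - 1) h1
    have e1 : (removeAt xs j)[i - 1]? = xs[i]? := by
      rw [removeAt_getElem? xs j (i - 1) (by omega)]
      rw [if_neg (by omega)]
      congr 1
      omega
    have e2 : (removeAt xs j)[i - 1 + 1]? = xs[i + 1]? := by
      rw [removeAt_getElem? xs j (i - 1 + 1) (by omega)]
      rw [if_neg (by omega)]
      congr 1
      omega
    apply hstep
    have g1 : (removeAt xs j)[i - 1] = xs.getD i 0 := by
      have := List.getElem?_eq_getElem (l := removeAt xs j) (i := i - 1) (by omega)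
      rw [this] at e1
      rw [List.getD_eq_getElem?_getD, ← e1]
      rfl
    have g2 : (removeAt xs j)[i - 1 + 1] = xs.getD (i + 1) 0 := by
      have := List.getElem?_eq_getElem (l := removeAt xs j) (i := i - 1 + 1) (by omega)
      rw [this] at e2
      rw [List.getD_eq_getElem?_getD, ← e2]
      rfl
    rwa [g1, g2] at this
  · -- i + 1 < j : the pair sits at index i of the removed list
    have hgt : i + 1 < j := by omega
    have h1 : i + 1 < (removeAt xs j).length := by omega
    have := List.isChain_iff_getElem.mp hch i h1
    have e1 : (removeAt xs j)[i]? = xs[i]? := by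
      rw [removeAt_getElem? xs j i (by omega), if_pos (by omega)]
    have e2 : (removeAt xs j)[i + 1]? = xs[i + 1]? := by
      rw [removeAt_getElem? xs j (i + 1) (by omega), if_pos (by omega)]
    apply hstep
    have g1 : (removeAt xs j)[i] = xs.getD i 0 := by
      have := List.getElem?_eq_getElem (l := removeAt xs j) (i := i) (by omega)
      rw [this] at e1
      rw [List.getD_eq_getElem?_getD, ← e1]
      rfl
    have g2 : (removeAt xs j)[i + 1] = xs.getD (i + 1) 0 := by
      have := List.getElem?_eq_getElem (l := removeAt xs j) (i := i + 1) (by omega)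
      rw [this] at e2
      rw [List.getD_eq_getElem?_getD, ← e2]
      rfl
    rwa [g1, g2] at this

theorem chain_iff_zip (R : Int → Int → Prop) : ∀ xs : List Int,
    (∀ p ∈ xs.zip xs.tail, R p.1 p.2) ↔ List.IsChain R xs
  | [] => by simp
  | [a] => by simp
  | a :: b :: rest => by
    have hz : (a :: b :: rest).zip (a :: b :: rest).tail
        = (a, b) :: (b :: rest).zip rest := by simp [List.zip]
    rw [hz, List.isChain_cons_cons, ← chain_iff_zip R (b :: rest)]
    simp

theorem ivsLoop_true_iff : ∀ ps : List (Int × Int),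
    ivsLoop true ps = true ↔ ∀ p ∈ ps, Step 1 3 p.1 p.2
  | [] => by simp [ivsLoop]
  | (a, b) :: rest => by
    rw [ivsLoop]
    simp only [Bool.not_true, Bool.false_and, Bool.false_eq_true, if_false, Bool.true_and]
    split_ifs with h1 h2
    · simp only [beq_iff_eq] at h1
      constructor
      · intro h; cases h
      · intro h
        have hs := h (a, b) (List.mem_cons_self ..)
        have hx := hs.1
        omega
    · simp only [Bool.or_eq_true, decide_eq_true_iff] at h2
      constructor
      · intro h; cases h
      · intro h
        have hs := h (a, b) (List.mem_cons_self ..)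
        have hx := hs.1
        have hy := hs.2
        omega
    · rw [ivsLoop_true_iff rest]
      simp only [beq_iff_eq] at h1
      simp only [Bool.or_eq_true, decide_eq_true_iff, not_or, not_lt] at h2
      simp only [List.forall_mem_cons]
      have hs : Step 1 3 a b := ⟨by omega, by omega⟩
      exact ⟨fun hr => ⟨hs, hr⟩, fun h => h.2⟩

theorem ivsLoop_false_iff : ∀ ps : List (Int × Int),
    ivsLoop false ps = true ↔ ∀ p ∈ ps, Step (-3) (-1) p.1 p.2
  | [] => by simp [ivsLoop]
  | (a, b) :: rest => by
    rw [ivsLoop]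
    simp only [Bool.false_and, Bool.false_eq_true, if_false, Bool.not_false, Bool.true_and]
    split_ifs with h1 h2
    · simp only [beq_iff_eq] at h1
      constructor
      · intro h; cases h
      · intro h
        have hs := h (a, b) (List.mem_cons_self ..)
        have hx := hs.1
        have hy := hs.2
        omega
    · simp only [Bool.or_eq_true, decide_eq_true_iff] at h2
      constructor
      · intro h; cases h
      · intro h
        have hs := h (a, b) (List.mem_cons_self ..)
        have hx := hs.1
        have hy := hs.2
        omega
    · rw [ivsLoop_false_iff rest]
      simp only [beq_iff_eq] at h1
      simp only [Bool.or_eq_true, decide_eq_true_iff, not_or, not_lt] at h2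
      simp only [List.forall_mem_cons]
      have hs : Step (-3) (-1) a b := ⟨by omega, by omega⟩
      exact ⟨fun hr => ⟨hs, hr⟩, fun h => h.2⟩

theorem is_valid_iff : ∀ (xs : List Int), 2 ≤ xs.length →
    (is_valid_sequence xs = true ↔
      (List.IsChain (Step 1 3) xs ∨ List.IsChain (Step (-3) (-1)) xs))
  | a :: b :: rest, _ => by
    rw [is_valid_sequence]
    by_cases hab : a < b
    · rw [decide_eq_true hab, ivsLoop_true_iff, chain_iff_zip]
      constructor
      · exact Or.inl
      · rintro (h | h)
        · exact h
        · have hs : Step (-3) (-1) a b := (List.isChain_cons_cons.mp h).1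
          have hx := hs.2
          omega
    · rw [decide_eq_false hab, ivsLoop_false_iff, chain_iff_zip]
      constructor
      · exact Or.inr
      · rintro (h | h)
        · have hs : Step 1 3 a b := (List.isChain_cons_cons.mp h).1
          have hx := hs.1
          omega
        · exact h

theorem okDir_true_of_chain (xs : List Int) (lo hi : Int)
    (h : List.IsChain (Step lo hi) xs) : okDir xs lo hi = true := by
  unfold okDir
  rw [(fb_none_iff lo hi xs 0).mpr h]

theorem okDir_true_iff (xs : List Int) (lo hi : Int) :
    okDir xs lo hi = true ↔
      (List.IsChain (Step lo hi) xs ∨ ∃ i, fbAux lo hi xs 0 = some i ∧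
        (List.IsChain (Step lo hi) (removeAt xs i) ∨
         List.IsChain (Step lo hi) (removeAt xs (i + 1)))) := by
  unfold okDir
  cases hfb : fbAux lo hi xs 0 with
  | none =>
    constructor
    · intro _
      exact Or.inl ((fb_none_iff lo hi xs 0).mp hfb)
    · intro _
      rfl
  | some i =>
    simp only [Bool.or_eq_true, Option.isNone_iff_eq_none, fb_none_iff]
    constructor
    · rintro (h | h)
      · exact Or.inr ⟨i, rfl, Or.inl h⟩
      · exact Or.inr ⟨i, rfl, Or.inr h⟩
    · rintro (h | ⟨i', hi', h⟩)
      · rw [(fb_none_iff lo hi xs 0).mpr h] at hfb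
        cases hfb
      · cases hi'
        exact h

-- ===== VERDICT (by name: the statement is the Claim_ definition above) =====
theorem problem_dampener_spec : Claim_equal_problem_dampener := by
  intro level _ hpre
  unfold Spec_problem_dampener
  rcases hpre with h3 | ⟨h2, hpair⟩
  · -- length ≥ 3
    rw [Bool.eq_iff_iff]
    have hA : problem_dampener level = true ↔
        (is_valid_sequence level = true ∨
          ∃ i, i < level.length ∧ is_valid_sequence (removeAt level i) = true) := by
      unfold problem_dampener
      split_ifs with h
      · simp only [true_iff]
        exact Or.inl h
      · simp only [List.any_eq_true, List.mem_range, removeAt]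
        constructor
        · rintro ⟨i, hi, hv⟩
          exact Or.inr ⟨i, hi, hv⟩
        · rintro (hv | ⟨i, hi, hv⟩)
          · exact absurd hv h
          · exact ⟨i, hi, hv⟩
    have hB : problem_dampener_alt level = true ↔
        (okDir level 1 3 = true ∨ okDir level (-3) (-1) = true) := by
      unfold problem_dampener_alt
      exact (Bool.or_eq_true ..).to_iff
    rw [hA, hB]
    constructor
    · rintro (hv | ⟨i, hi, hv⟩)
      · rcases (is_valid_iff level (by omega)).mp hv with h | h
        · exact Or.inl ((okDir_true_iff level 1 3).mpr (Or.inl h))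
        · exact Or.inr ((okDir_true_iff level (-3) (-1)).mpr (Or.inl h))
      · have hrm2 : 2 ≤ (removeAt level i).length := by
          rw [removeAt_length level i hi]; omega
        rcases (is_valid_iff _ hrm2).mp hv with h | h
        · refine Or.inl ?_
          by_cases hc : List.IsChain (Step 1 3) level
          · exact (okDir_true_iff level 1 3).mpr (Or.inl hc)
          · have hne : fbAux 1 3 level 0 ≠ none := fun hn => hc ((fb_none_iff 1 3 level 0).mp hn)
            obtain ⟨i0, hi0⟩ := Option.ne_none_iff_exists'.mp hne
            rcases remove_adj 1 3 level i0 i hi0 hi h with heq | heq <;> rw [heq] at h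
            · exact (okDir_true_iff level 1 3).mpr (Or.inr ⟨i0, hi0, Or.inl h⟩)
            · exact (okDir_true_iff level 1 3).mpr (Or.inr ⟨i0, hi0, Or.inr h⟩)
        · refine Or.inr ?_
          by_cases hc : List.IsChain (Step (-3) (-1)) level
          · exact (okDir_true_iff level (-3) (-1)).mpr (Or.inl hc)
          · have hne : fbAux (-3) (-1) level 0 ≠ none :=
              fun hn => hc ((fb_none_iff (-3) (-1) level 0).mp hn)
            obtain ⟨i0, hi0⟩ := Option.ne_none_iff_exists'.mp hne
            rcases remove_adj (-3) (-1) level i0 i hi0 hi h with heq | heq <;> rw [heq] at h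
            · exact (okDir_true_iff level (-3) (-1)).mpr (Or.inr ⟨i0, hi0, Or.inl h⟩)
            · exact (okDir_true_iff level (-3) (-1)).mpr (Or.inr ⟨i0, hi0, Or.inr h⟩)
    · have side : ∀ lo hi : Int, okDir level lo hi = true →
          (List.IsChain (Step lo hi) level ∨
            ∃ i, i < level.length ∧
              (List.IsChain (Step lo hi) (removeAt level i) ∨
               (i + 1 < level.length ∧ List.IsChain (Step lo hi) (removeAt level (i + 1))))) := by
        intro lo hi hok
        rcases (okDir_true_iff level lo hi).mp hok with hch | ⟨i, hfb, hrm⟩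
        · exact Or.inl hch
        · obtain ⟨k, hk0, hlen, -⟩ := fb_some_spec lo hi level 0 i hfb
          rcases hrm with h | h
          · exact Or.inr ⟨i, by omega, Or.inl h⟩
          · exact Or.inr ⟨i, by omega, Or.inr ⟨by omega, h⟩⟩
      rintro (hok | hok)
      · rcases side 1 3 hok with hch | ⟨i, hi, hrm⟩
        · exact Or.inl ((is_valid_iff level (by omega)).mpr (Or.inl hch))
        · rcases hrm with h | ⟨hi1, h⟩
          · refine Or.inr ⟨i, hi, ?_⟩
            exact (is_valid_iff _ (by rw [removeAt_length level i hi]; omega)).mpr (Or.inl h)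
          · refine Or.inr ⟨i + 1, hi1, ?_⟩
            exact (is_valid_iff _ (by rw [removeAt_length level (i + 1) hi1]; omega)).mpr (Or.inl h)
      · rcases side (-3) (-1) hok with hch | ⟨i, hi, hrm⟩
        · exact Or.inl ((is_valid_iff level (by omega)).mpr (Or.inr hch))
        · rcases hrm with h | ⟨hi1, h⟩
          · refine Or.inr ⟨i, hi, ?_⟩
            exact (is_valid_iff _ (by rw [removeAt_length level i hi]; omega)).mpr (Or.inr h)
          · refine Or.inr ⟨i + 1, hi1, ?_⟩
            exact (is_valid_iff _ (by rw [removeAt_length level (i + 1) hi1]; omega)).mpr (Or.inr h)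
  · -- length = 2 and the single pair is within range
    rcases level with _ | ⟨a, l⟩
    · simp at h2
    rcases l with _ | ⟨b, l⟩
    · simp at h2
    rcases l with _ | ⟨c, l⟩
    · -- level = [a, b]
      simp only [List.getD_cons_succ, List.getD_cons_zero] at hpair
      have hch : List.IsChain (Step 1 3) [a, b] ∨ List.IsChain (Step (-3) (-1)) [a, b] := by
        rcases hpair with ⟨hx, hy⟩ | ⟨hx, hy⟩
        · exact Or.inl (List.isChain_cons_cons.mpr ⟨⟨by omega, by omega⟩, by simp⟩)
        · exact Or.inr (List.isChain_cons_cons.mpr ⟨⟨by omega, by omega⟩, by simp⟩)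
      have hv : is_valid_sequence [a, b] = true := (is_valid_iff _ (by simp)).mpr hch
      have hB : problem_dampener_alt [a, b] = true := by
        unfold problem_dampener_alt
        rcases hch with h | h
        · rw [okDir_true_of_chain _ _ _ h]
          rfl
        · rw [okDir_true_of_chain _ _ _ h]
          simp
      unfold problem_dampener
      rw [if_pos hv, hB]
    · simp at h2
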